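-- pv_equiv track=rewrite | github.com/jayantk137/ProblemsSolved | MakingAnagrams.py | makeAnagram
-- ===== SOURCE A (Python) =====
-- def makeAnagram(a, b):
--     freq = dict()
--     count = 0
--     for char in a:
--         if char in freq:
--             freq[char]+=1
--             count +=1
--         else:
--             freq[char]=1
--             count +=1
--
--     for char in b:
--         if char in freq:
--             freq[char]-=1
--             if freq[char]==0:
--                 freq.pop(char)
--             count-=1
--         else:
--             count+=1
--     return count
-- ===== SOURCE B (Python) =====
-- def makeAnagram(a, b):
--     ca = {}
--     for ch in a:
--         ca[ch] = ca.get(ch, 0) + 1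
--     cb = {}
--     for ch in b:
--         cb[ch] = cb.get(ch, 0) + 1
--     total = 0
--     for ch in {**ca, **cb}:
--         total += abs(ca.get(ch, 0) - cb.get(ch, 0))
--     return total
-- ===== Notes on version B (the rewrite author's own statement) =====
-- stated objective: simpler
-- what changed: B builds two independent frequency tables for a and b in two separate passes and then sums abs(ca.get(c,0)-cb.get(c,0)) over the union of their keys, replacing A's single merged subtract-and-pop pass with its in-loop conditional decrement/erase bookkeeping.
import Mathlib
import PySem

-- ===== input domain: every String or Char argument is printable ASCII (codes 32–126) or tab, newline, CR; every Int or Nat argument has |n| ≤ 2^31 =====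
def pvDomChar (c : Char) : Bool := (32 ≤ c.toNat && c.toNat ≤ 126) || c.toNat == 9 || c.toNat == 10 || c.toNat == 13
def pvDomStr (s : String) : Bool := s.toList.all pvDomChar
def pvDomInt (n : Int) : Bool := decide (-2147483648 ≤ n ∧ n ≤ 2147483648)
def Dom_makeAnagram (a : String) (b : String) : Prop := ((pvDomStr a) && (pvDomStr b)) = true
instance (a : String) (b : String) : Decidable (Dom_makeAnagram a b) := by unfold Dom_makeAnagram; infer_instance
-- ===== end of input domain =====

-- B replaces A's merged subtract-and-pop pass by two independent counters reduced with
-- abs-differences over the key union (objective: simpler; same O(|a|+|b|) cost).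

-- ===== PORT A =====
-- first loop of A: build freq and count over a
def stepA1 (s : PySem.Dict Char Int × Int) (ch : Char) : PySem.Dict Char Int × Int :=
  if s.1.contains ch then (s.1.insert ch (s.1.getD ch 0 + 1), s.2 + 1)
  else (s.1.insert ch 1, s.2 + 1)

-- second loop of A: decrement / pop over b
def stepA2 (s : PySem.Dict Char Int × Int) (ch : Char) : PySem.Dict Char Int × Int :=
  if s.1.contains ch then
    let f := s.1.insert ch (s.1.getD ch 0 - 1)
    if f.getD ch 0 == 0 then (f.erase ch, s.2 - 1) else (f, s.2 - 1)
  else (s.1, s.2 + 1)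

def makeAnagram (a : String) (b : String) : Int :=
  (b.toList.foldl stepA2 (a.toList.foldl stepA1 (PySem.Dict.empty, 0))).2

-- ===== PORT B =====
-- B helper: dict frequency table of one string (ca / cb build loops)
def freqTable (l : List Char) : PySem.Dict Char Int :=
  l.foldl (fun d ch => d.insert ch (d.getD ch 0 + 1)) PySem.Dict.empty

def makeAnagram_alt (a : String) (b : String) : Int :=
  let ca := freqTable a.toList
  let cb := freqTable b.toList
  -- 'for ch in {**ca, **cb}:' — iterate the keys of the order-preserving dict merge
  ((ca.update cb.items).keys).foldl (fun total ch => total + |ca.getD ch 0 - cb.getD ch 0|) 0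

-- ===== PRECONDITION & SPEC =====
def Spec_makeAnagram (a : String) (b : String) (out : Int) : Prop := out = makeAnagram_alt a b
instance (a : String) (b : String) (out : Int) : Decidable (Spec_makeAnagram a b out) := by unfold Spec_makeAnagram; infer_instance

-- ===== CLAIM (what is proved, stated in full; the proofs are below) =====
def Claim_equal_makeAnagram : Prop := ∀ (a : String) (b : String), Dom_makeAnagram a b → Spec_makeAnagram a b (makeAnagram a b)

-- ===== LEMMAS AND PROOFS =====

-- number of characters of the list that the second loop of A "matches" against remaining budget r
def matchCount : List Char → (Char → ℕ) → ℕ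
  | [], _ => 0
  | ch :: t, r => if 0 < r ch then 1 + matchCount t (Function.update r ch (r ch - 1)) else matchCount t r

lemma dict_get?_erase (d : PySem.Dict Char Int) (k k' : Char) :
    (d.erase k).get? k' = if k' = k then none else d.get? k' := by
  obtain ⟨items⟩ := d
  simp only [PySem.Dict.erase, PySem.Dict.get?]
  induction items with
  | nil => simp
  | cons p t ih =>
    by_cases hk : k' = k
    · by_cases hpk : p.1 = k <;> simp_all [List.filter_cons]
    · by_cases hpk : p.1 = k <;> by_cases hpk' : p.1 = k' <;> simp_all [List.filter_cons]

lemma dict_getD_erase (d : PySem.Dict Char Int) (k k' : Char) :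
    (d.erase k).getD k' 0 = if k' = k then 0 else d.getD k' 0 := by
  simp only [PySem.Dict.getD, dict_get?_erase]
  by_cases hk : k' = k <;> simp [hk]

lemma dict_contains_erase (d : PySem.Dict Char Int) (k k' : Char) :
    (d.erase k).contains k' = if k' = k then false else d.contains k' := by
  rw [PySem.Dict.contains_eq_isSome_get?, PySem.Dict.contains_eq_isSome_get?, dict_get?_erase]
  by_cases hk : k' = k <;> simp [hk]

lemma loop1_eq (l : List Char) (d : PySem.Dict Char Int) (c : Int) :
    l.foldl stepA1 (d, c) =
      (l.foldl (fun d ch => d.insert ch (d.getD ch 0 + 1)) d, c + (l.length : Int)) := by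
  induction l generalizing d c with
  | nil => simp
  | cons ch t ih =>
    have hbody : stepA1 (d, c) ch = (d.insert ch (d.getD ch 0 + 1), c + 1) := by
      by_cases h : d.contains ch = true
      · simp [stepA1, h]
      · have h0 : d.getD ch 0 = 0 :=
          PySem.Dict.getD_of_not_contains d 0 (by simpa using h)
        simp [stepA1, h, h0]
    rw [List.foldl_cons, hbody, ih]
    refine Prod.ext rfl ?_
    push_cast [List.length_cons]
    ring

lemma loop2_eq (lb : List Char) (d : PySem.Dict Char Int) (c : Int) (r : Char → ℕ)
    (h1 : ∀ x, d.contains x = decide (0 < r x))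
    (h2 : ∀ x, d.getD x 0 = (r x : Int)) :
    (lb.foldl stepA2 (d, c)).2 = c + (lb.length : Int) - 2 * (matchCount lb r : Int) := by
  induction lb generalizing d c r with
  | nil => simp [matchCount]
  | cons ch t ih =>
    simp only [List.foldl_cons]
    by_cases hpos : 0 < r ch
    · have hcont : d.contains ch = true := by rw [h1]; simpa using hpos
      have hget : (d.insert ch (d.getD ch 0 - 1)).getD ch 0 = (r ch : Int) - 1 := by
        rw [PySem.Dict.getD_insert, if_pos rfl, h2]
      by_cases hr1 : r ch = 1
      · -- value hits 0: the key is popped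
        have hstep : stepA2 (d, c) ch = ((d.insert ch (d.getD ch 0 - 1)).erase ch, c - 1) := by
          simp [stepA2, hcont, hget, hr1]
        rw [hstep, ih _ _ (Function.update r ch 0) ?_ ?_]
        · have hm : matchCount (ch :: t) r
              = 1 + matchCount t (Function.update r ch 0) := by
            rw [matchCount, if_pos hpos, hr1]
          rw [hm]; push_cast [List.length_cons]; ring
        · intro x
          rw [dict_contains_erase]
          by_cases hx : x = ch
          · subst hx; simp
          · rw [if_neg hx, PySem.Dict.contains_insert, Function.update_of_ne hx, ← h1 x]
            simp [hx]
        · intro x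
          rw [dict_getD_erase]
          by_cases hx : x = ch
          · subst hx; simp
          · simp only [hx, if_false, Function.update_of_ne hx]
            rw [PySem.Dict.getD_insert, if_neg hx, h2]
      · -- value stays positive
        have hne : ((r ch : Int) - 1 == 0) = false := by
          simp only [beq_eq_false_iff_ne, ne_eq]
          omega
        have hstep : stepA2 (d, c) ch = (d.insert ch (d.getD ch 0 - 1), c - 1) := by
          simp [stepA2, hcont, hget, hne]
        rw [hstep, ih _ _ (Function.update r ch (r ch - 1)) ?_ ?_]
        · rw [matchCount, if_pos hpos]; push_cast [List.length_cons]; ring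
        · intro x
          rw [PySem.Dict.contains_insert]
          by_cases hx : x = ch
          · subst hx; simp [Function.update_self]; omega
          · simp only [Function.update_of_ne hx, ← h1 x]
            simp [hx]
        · intro x
          rw [PySem.Dict.getD_insert]
          by_cases hx : x = ch
          · subst hx; rw [if_pos rfl, h2, Function.update_self]; push_cast; omega
          · rw [if_neg hx, Function.update_of_ne hx, h2]
    · have hcont : d.contains ch = false := by rw [h1]; simpa using hpos
      have hstep : stepA2 (d, c) ch = (d, c + 1) := by simp [stepA2, hcont]
      rw [hstep, ih _ _ r h1 h2, matchCount, if_neg hpos]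
      push_cast [List.length_cons]; ring

lemma matchCount_eq (lb : List Char) (r : Char → ℕ) (S : Finset Char)
    (hS : ∀ x ∈ lb, x ∈ S) :
    matchCount lb r = ∑ x ∈ S, min (r x) (lb.count x) := by
  induction lb generalizing r with
  | nil => simp [matchCount]
  | cons ch t ih =>
    have hch : ch ∈ S := hS ch (by simp)
    have hT : ∀ x ∈ t, x ∈ S := fun x hx => hS x (by simp [hx])
    by_cases hpos : 0 < r ch
    · rw [matchCount, if_pos hpos, ih (Function.update r ch (r ch - 1)) hT]
      rw [← Finset.add_sum_erase S _ hch, ← Finset.add_sum_erase S _ hch]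
      have hterm : min (r ch) ((ch :: t).count ch)
          = 1 + min (Function.update r ch (r ch - 1) ch) (t.count ch) := by
        rw [Function.update_self, List.count_cons_self]; omega
      have hsum : ∑ x ∈ S.erase ch, min (Function.update r ch (r ch - 1) x) (t.count x)
          = ∑ x ∈ S.erase ch, min (r x) ((ch :: t).count x) := by
        apply Finset.sum_congr rfl
        intro x hx
        have hxne : x ≠ ch := (Finset.mem_erase.mp hx).1
        rw [Function.update_of_ne hxne]
        simp [List.count_cons, Ne.symm hxne]
      rw [hsum, hterm]
      ring
    · rw [matchCount, if_neg hpos, ih r hT]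
      apply Finset.sum_congr rfl
      intro x hx
      by_cases hxne : x = ch
      · subst hxne; omega
      · simp [List.count_cons, Ne.symm hxne]

lemma set_mem_update {x : Char} (s : PySem.Set Char) (l : List Char) :
    x ∈ PySem.Set.update s l ↔ x ∈ s ∨ x ∈ l := by
  induction l generalizing s with
  | nil => simp [PySem.Set.update]
  | cons y t ih =>
    show x ∈ PySem.Set.update (PySem.Set.add s y) t ↔ _
    rw [ih]
    simp [PySem.Set.mem_add, or_assoc]

lemma abs_sub_counts (p q : ℕ) :
    |(p : Int) - (q : Int)| = (p : Int) + q - 2 * (min p q : ℕ) := by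
  rcases le_total p q with h | h
  · rw [abs_of_nonpos (by push_cast; omega), min_eq_left h]; push_cast; omega
  · rw [abs_of_nonneg (by push_cast; omega), min_eq_right h]; push_cast; omega

lemma sum_count_over (l : List Char) (S : Finset Char) (hS : l.toFinset ⊆ S) :
    ∑ x ∈ S, l.count x = l.length := by
  rw [← Finset.sum_subset hS (fun x _ hx => by
    simpa [List.count_eq_zero] using fun h => hx (List.mem_toFinset.mpr h))]
  simpa using Multiset.toFinset_sum_count_eq (l : Multiset Char)

-- B's fold equals the abs-difference sum over the union finset
lemma alt_eq_sum (a b : String) :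
    makeAnagram_alt a b
      = ∑ x ∈ (a.toList ++ b.toList).toFinset,
          |(a.toList.count x : Int) - (b.toList.count x : Int)| := by
  have hca : freqTable a.toList = PySem.Dict.counter a.toList :=
    PySem.Dict.foldl_insert_getD_add_one_eq_counter a.toList
  have hcb : freqTable b.toList = PySem.Dict.counter b.toList :=
    PySem.Dict.foldl_insert_getD_add_one_eq_counter b.toList
  set U := (((freqTable a.toList).update (freqTable b.toList).items).keys) with hU
  have hnd : U.Nodup := by
    rw [hU]
    exact PySem.Dict.nodup_keys_update _ _ (by rw [hca]; exact PySem.Dict.nodup_keys_counter _)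
  have hmem : ∀ x, x ∈ U ↔ x ∈ a.toList ∨ x ∈ b.toList := by
    intro x
    rw [hU]
    show x ∈ (List.foldl (fun acc p => acc.insert p.1 p.2) (freqTable a.toList)
        (freqTable b.toList).items).keys ↔ _
    rw [PySem.Dict.keys_foldl_insert_key (freqTable b.toList).items Prod.fst
          (fun _ p => p.2) (freqTable a.toList)]
    rw [set_mem_update]
    have hka : (freqTable a.toList).keys = PySem.Set.ofList a.toList := by
      rw [hca]; exact PySem.Dict.keys_counter _
    have hkb : ((freqTable b.toList).items).map Prod.fst = PySem.Set.ofList b.toList := by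
      rw [hcb]; exact PySem.Dict.keys_counter _
    rw [hka, hkb, PySem.Set.mem_ofList, PySem.Set.mem_ofList]
  have hTF : U.toFinset = (a.toList ++ b.toList).toFinset := by
    ext x
    simp [hmem x]
  show U.foldl (fun total ch =>
      total + |(freqTable a.toList).getD ch 0 - (freqTable b.toList).getD ch 0|) 0 = _
  rw [PySem.List.foldl_add (g := fun ch =>
      |(freqTable a.toList).getD ch 0 - (freqTable b.toList).getD ch 0|)]
  rw [zero_add, ← List.sum_toFinset _ hnd, hTF]
  apply Finset.sum_congr rfl
  intro x _
  rw [hca, hcb, PySem.Dict.getD_counter, PySem.Dict.getD_counter]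

-- ===== VERDICT (by name: the statement is the Claim_ definition above) =====
theorem makeAnagram_spec : Claim_equal_makeAnagram := by
  intro a b _
  show makeAnagram a b = makeAnagram_alt a b
  have hA : makeAnagram a b
      = (0 + (a.toList.length : Int)) + b.toList.length
        - 2 * (matchCount b.toList (fun x => a.toList.count x) : Int) := by
    unfold makeAnagram
    rw [loop1_eq, PySem.Dict.foldl_insert_getD_add_one_eq_counter]
    rw [loop2_eq b.toList _ _ (fun x => a.toList.count x) ?_ ?_]
    · intro x
      rw [PySem.Dict.contains_counter]
      simp [List.count_pos_iff]
    · intro x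
      exact PySem.Dict.getD_counter a.toList x
  rw [hA, alt_eq_sum]
  rw [matchCount_eq b.toList _ ((a.toList ++ b.toList).toFinset)
    (fun x hx => by simp [hx])]
  have hsum : ∀ x ∈ (a.toList ++ b.toList).toFinset,
      |(a.toList.count x : Int) - (b.toList.count x : Int)|
      = (a.toList.count x : Int) + b.toList.count x
        - 2 * (min (a.toList.count x) (b.toList.count x) : ℕ) :=
    fun x _ => abs_sub_counts _ _
  rw [Finset.sum_congr rfl hsum]
  have h1 : ∑ x ∈ (a.toList ++ b.toList).toFinset, (a.toList.count x) = a.toList.length :=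
    sum_count_over a.toList _ (by intro x hx; simp at hx ⊢; tauto)
  have h2 : ∑ x ∈ (a.toList ++ b.toList).toFinset, (b.toList.count x) = b.toList.length :=
    sum_count_over b.toList _ (by intro x hx; simp at hx ⊢; tauto)
  rw [Finset.sum_sub_distrib, Finset.sum_add_distrib, ← Finset.mul_sum]
  push_cast [← h1, ← h2]
  ring
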